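-- pv_equiv track=rewrite | github.com/jhonatangopereira/CompetitiveProgramming | interviews/sort_roman.py | sortRoman
-- ===== SOURCE A (Python) =====
-- def value(r):
--     if (r == 'I'):
--         return 1
--     if (r == 'V'):
--         return 5
--     if (r == 'X'):
--         return 10
--     if (r == 'L'):
--         return 50
--     if (r == 'C'):
--         return 100
--     if (r == 'D'):
--         return 500
--     if (r == 'M'):
--         return 1000
--
--     return -1
--
-- def romanToDecimal(st):
--     res = 0
--     i = 0
--     while i < len(st):
--         s1 = value(st[i])
--         if (i + 1 < len(st)):
--             s2 = value(st[i + 1])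
--             if (s1 >= s2):
--                 res = res + s1
--             else :
--                 res = res + s2 - s1
--                 i += 1
--         else :
--             res = res + s1
--         i += 1
--
--     return res
--
-- def sortRoman(names):
--
--     n = len(names)
--
--     vp = []
--
--     for i in range(n):
--         p = romanToDecimal(names[i].split()[1])
--         vp.append((p, names[i]))
--
--     indexes = sorted(vp, key=lambda x: (x[1].split()[0], x[0]))
--     return [index[1] for index in indexes]
-- ===== SOURCE B (Python) =====
-- VALUES = {'I': 1, 'V': 5, 'X': 10, 'L': 50, 'C': 100, 'D': 500, 'M': 1000}
--
--
-- def _roman(st):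
--     # staged: chars -> values, greedy left-to-right tokenization into
--     # subtractive pairs / single symbols, then sum the token list
--     vals = [VALUES.get(c, -1) for c in st]
--     tokens = []
--     while vals:
--         if len(vals) >= 2 and vals[0] < vals[1]:
--             tokens.append(vals[1] - vals[0])
--             vals = vals[2:]
--         else:
--             tokens.append(vals[0])
--             vals = vals[1:]
--     return sum(tokens)
--
--
-- def sortRoman(names):
--     # two staged stable sorts: secondary key (roman value) first,
--     # then primary key (first token); stability makes this the (k1, k2) order
--     by_value = sorted(names, key=lambda nm: _roman(nm.split()[1]))
--     return sorted(by_value, key=lambda nm: nm.split()[0])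
-- ===== Notes on version B (the rewrite author's own statement) =====
-- stated objective: alternative
-- what changed: sortRoman becomes two staged stable sorts (sort by roman value, then stable-sort by first token) instead of building a (value,name) pair list and sorting it once by a tuple key, and the roman conversion becomes staged passes (map chars to values, greedily tokenize into a list of token values, sum) instead of an index while-loop with lookahead-skip.
import Mathlib
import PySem

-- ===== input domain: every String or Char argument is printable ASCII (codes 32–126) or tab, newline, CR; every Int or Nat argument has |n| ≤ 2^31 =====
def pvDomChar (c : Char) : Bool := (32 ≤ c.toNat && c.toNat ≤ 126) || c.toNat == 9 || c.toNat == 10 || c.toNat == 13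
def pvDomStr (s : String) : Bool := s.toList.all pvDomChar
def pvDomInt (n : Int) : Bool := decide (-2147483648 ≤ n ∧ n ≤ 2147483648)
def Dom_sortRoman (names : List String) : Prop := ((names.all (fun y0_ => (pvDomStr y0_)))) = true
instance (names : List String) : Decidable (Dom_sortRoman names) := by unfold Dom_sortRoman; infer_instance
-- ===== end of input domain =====

-- B replaces A's single tuple-key sort of (value, name) pairs by two staged stable sorts
-- (by roman value, then by first token) and A's index loop by map-tokenize-sum (objective: alternative).

-- ===== PORT A =====

def pvValue (r : Char) : Int :=
  if r = 'I' then 1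
  else if r = 'V' then 5
  else if r = 'X' then 10
  else if r = 'L' then 50
  else if r = 'C' then 100
  else if r = 'D' then 500
  else if r = 'M' then 1000
  else -1

-- the while loop over index i, as recursion on the characters from position i (advance by 1 or 2)
def pvRomanGo (res : Int) : List Char → Int
  | [] => res
  | [c] => res + pvValue c
  | c1 :: c2 :: rest =>
      if pvValue c1 ≥ pvValue c2 then pvRomanGo (res + pvValue c1) (c2 :: rest)
      else pvRomanGo (res + pvValue c2 - pvValue c1) rest

def pvRomanToDecimal (st : String) : Int := pvRomanGo 0 st.toList

def sortRoman (names : List String) : List String :=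
  -- names[i].split()[1]: the .getD "" totalizes the IndexError; Pre_sortRoman excludes those inputs
  let vp := names.foldl
    (fun acc nm => acc ++ [(pvRomanToDecimal ((PySem.List.pyGet? (PySem.Str.split₀ nm) 1).getD ""), nm)])
    ([] : List (Int × String))
  let indexes := PySem.List.sorted2 vp
    (fun x => (PySem.List.pyGet? (PySem.Str.split₀ x.2) 0).getD "") (fun x => x.1)
  indexes.map (fun x => x.2)

-- ===== PORT B =====

def pvbValues : PySem.Dict Char Int :=
  PySem.Dict.ofList [('I', 1), ('V', 5), ('X', 10), ('L', 50), ('C', 100), ('D', 500), ('M', 1000)]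

-- Source B's while loop popping one or two values off the front, as recursion on the value list
def pvbTokens : List Int → List Int
  | [] => []
  | [v] => [v]
  | v1 :: v2 :: rest =>
      if v1 < v2 then (v2 - v1) :: pvbTokens rest else v1 :: pvbTokens (v2 :: rest)

def pvbRoman (st : String) : Int :=
  (pvbTokens (st.toList.map (fun c => pvbValues.getD c (-1)))).sum

def sortRoman_alt (names : List String) : List String :=
  let byValue := PySem.List.sorted names
    (fun nm => pvbRoman ((PySem.List.pyGet? (PySem.Str.split₀ nm) 1).getD ""))
  PySem.List.sorted byValue
    (fun nm => (PySem.List.pyGet? (PySem.Str.split₀ nm) 0).getD "")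

-- ===== PRECONDITION & SPEC =====
-- A raises IndexError (names[i].split()[1]) exactly when some name has fewer than two
-- whitespace-separated tokens; Pre_ excludes those inputs and nothing else.
def Pre_sortRoman (names : List String) : Prop :=
  ∀ nm ∈ names, 2 ≤ (PySem.Str.split₀ nm).length
-- admitted: every name has a second whitespace-separated token, e.g. "a X", "b IX", "ab IV",
-- "z MCM", "c D", "aa bb", "x 1_0"; excluded: a name with fewer tokens, e.g. "abc", "", " X".

instance (names : List String) : Decidable (Pre_sortRoman names) := by
  unfold Pre_sortRoman; infer_instance

def pvWitness_sortRoman : List String := ["b IX", "a X", "a IV"]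

def Spec_sortRoman (names : List String) (out : List String) : Prop := out = sortRoman_alt names
instance (names : List String) (out : List String) : Decidable (Spec_sortRoman names out) := by unfold Spec_sortRoman; infer_instance

-- ===== CLAIM (what is proved, stated in full; the proofs are below) =====
def Claim_equal_sortRoman : Prop := ∀ (names : List String), Dom_sortRoman names → Pre_sortRoman names → Spec_sortRoman names (sortRoman names)

-- ===== LEMMAS AND PROOFS =====

lemma pv_values_eq (c : Char) : pvbValues.getD c (-1) = pvValue c := by
  by_cases h1 : c = 'I'; · subst h1; decide
  by_cases h2 : c = 'V'; · subst h2; decide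
  by_cases h3 : c = 'X'; · subst h3; decide
  by_cases h4 : c = 'L'; · subst h4; decide
  by_cases h5 : c = 'C'; · subst h5; decide
  by_cases h6 : c = 'D'; · subst h6; decide
  by_cases h7 : c = 'M'; · subst h7; decide
  have h : pvbValues.items
      = [('I', 1), ('V', 5), ('X', 10), ('L', 50), ('C', 100), ('D', 500), ('M', 1000)] := by decide
  have b1 : ('I' == c) = false := beq_eq_false_iff_ne.mpr (Ne.symm h1)
  have b2 : ('V' == c) = false := beq_eq_false_iff_ne.mpr (Ne.symm h2)
  have b3 : ('X' == c) = false := beq_eq_false_iff_ne.mpr (Ne.symm h3)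
  have b4 : ('L' == c) = false := beq_eq_false_iff_ne.mpr (Ne.symm h4)
  have b5 : ('C' == c) = false := beq_eq_false_iff_ne.mpr (Ne.symm h5)
  have b6 : ('D' == c) = false := beq_eq_false_iff_ne.mpr (Ne.symm h6)
  have b7 : ('M' == c) = false := beq_eq_false_iff_ne.mpr (Ne.symm h7)
  simp only [PySem.Dict.getD, PySem.Dict.get?, h, List.find?_cons, List.find?_nil]
  simp [pvValue, h1, h2, h3, h4, h5, h6, h7, b1, b2, b3, b4, b5, b6, b7]

-- A's index loop equals B's tokenize-then-sum on the mapped value list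
lemma pv_go_tokens (n : Nat) : ∀ (l : List Char), l.length ≤ n → ∀ (res : Int),
    pvRomanGo res l = res + (pvbTokens (l.map pvValue)).sum := by
  induction n with
  | zero =>
      intro l hl res
      have : l = [] := List.length_eq_zero_iff.mp (Nat.le_zero.mp hl)
      subst this; simp [pvRomanGo, pvbTokens]
  | succ n ih =>
      intro l hl res
      match l with
      | [] => simp [pvRomanGo, pvbTokens]
      | [c] => simp [pvRomanGo, pvbTokens]
      | c1 :: c2 :: rest =>
          simp only [pvRomanGo, List.map, pvbTokens]
          by_cases hge : pvValue c1 ≥ pvValue c2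
          · rw [if_pos hge, if_neg (by omega)]
            rw [ih (c2 :: rest) (by simpa using Nat.le_of_succ_le_succ hl)]
            simp only [List.map]
            ring_nf
            rw [List.sum_cons]
            ring
          · rw [if_neg hge, if_pos (by omega)]
            rw [ih rest (by simp at hl ⊢; omega)]
            rw [List.sum_cons]
            ring

lemma pv_roman_eq (st : String) : pvbRoman st = pvRomanToDecimal st := by
  unfold pvbRoman pvRomanToDecimal
  rw [List.map_congr_left (fun c _ => pv_values_eq c)]
  rw [pv_go_tokens st.toList.length st.toList (Nat.le_refl _) 0]
  ring

-- ---- stability: one sort by the lexicographic pair key = sort by k2, then stable sort by k1 ----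

lemma pv_insertBy_nil {α : Type} (before : α → α → Bool) (x : α) :
    PySem.List.insertBy before x [] = [x] := rfl

lemma pv_insertBy_cons {α : Type} (before : α → α → Bool) (x y : α) (ys : List α) :
    PySem.List.insertBy before x (y :: ys)
      = if before x y then x :: y :: ys else y :: PySem.List.insertBy before x ys := rfl

lemma pv_insertBy_append_left {α : Type} (before : α → α → Bool) (x : α) (L M : List α)
    (h : ∃ y ∈ L, before x y = true) :
    PySem.List.insertBy before x (L ++ M) = PySem.List.insertBy before x L ++ M := by
  induction L with
  | nil => obtain ⟨y, hy, _⟩ := h; exact absurd hy (List.not_mem_nil)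
  | cons a L ih =>
      by_cases ha : before x a = true
      · simp [pv_insertBy_cons, ha]
      · obtain ⟨y, hy, hxy⟩ := h
        have hyL : y ∈ L := by
          rcases List.mem_cons.mp hy with h' | h'
          · subst h'; exact absurd hxy ha
          · exact h'
        simp [pv_insertBy_cons, ha, ih ⟨y, hyL, hxy⟩]

lemma pv_insertBy_append_right {α : Type} (before : α → α → Bool) (x : α) (L M : List α)
    (h : ∀ y ∈ L, before x y = false) :
    PySem.List.insertBy before x (L ++ M) = L ++ PySem.List.insertBy before x M := by
  induction L with
  | nil => simp
  | cons a L ih =>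
      have ha : before x a = false := h a (List.mem_cons_self)
      simp [pv_insertBy_cons, ha, ih (fun y hy => h y (List.mem_cons_of_mem a hy))]

lemma pv_insertBy_congr {α : Type} (b1 b2 : α → α → Bool) (x : α) (L : List α)
    (h : ∀ y ∈ L, b1 x y = b2 x y) :
    PySem.List.insertBy b1 x L = PySem.List.insertBy b2 x L := by
  induction L with
  | nil => rfl
  | cons a L ih =>
      have ha := h a (List.mem_cons_self)
      rw [pv_insertBy_cons, pv_insertBy_cons, ha,
        ih (fun y hy => h y (List.mem_cons_of_mem a hy))]

lemma pv_sorted_append {α κ : Type} [LinearOrder κ] (xs : List α) (x : α) (key : α → κ) :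
    PySem.List.sorted (xs ++ [x]) key
      = PySem.List.insertBy (fun a b => decide (key a < key b)) x (PySem.List.sorted xs key) := by
  rw [PySem.List.sorted_eq_foldl_insertBy, PySem.List.sorted_eq_foldl_insertBy, List.foldl_append]
  rfl

lemma pv_sorted2_append {α κ₁ κ₂ : Type} [LinearOrder κ₁] [LinearOrder κ₂]
    (xs : List α) (x : α) (k1 : α → κ₁) (k2 : α → κ₂) :
    PySem.List.sorted2 (xs ++ [x]) k1 k2
      = PySem.List.insertBy
          (fun a b => decide (k1 a < k1 b) || (!decide (k1 b < k1 a) && decide (k2 a < k2 b)))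
          x (PySem.List.sorted2 xs k1 k2) := by
  simp only [PySem.List.sorted2, List.foldl_append, List.foldl_cons, List.foldl_nil]
  simp

-- the two insertions commute when the later element has strictly larger k2
lemma pv_insert_comm {α κ₁ κ₂ : Type} [LinearOrder κ₁] [LinearOrder κ₂]
    (k1 : α → κ₁) (k2 : α → κ₂) (x t : α) (h : k2 x < k2 t) (S : List α) :
    PySem.List.insertBy (fun a b => decide (k1 a < k1 b)) t
        (PySem.List.insertBy
          (fun a b => decide (k1 a < k1 b) || (!decide (k1 b < k1 a) && decide (k2 a < k2 b))) x S)
      = PySem.List.insertBy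
          (fun a b => decide (k1 a < k1 b) || (!decide (k1 b < k1 a) && decide (k2 a < k2 b))) x
          (PySem.List.insertBy (fun a b => decide (k1 a < k1 b)) t S) := by
  induction S with
  | nil =>
      simp only [pv_insertBy_nil, pv_insertBy_cons]
      by_cases htx : k1 t < k1 x
      · simp [htx, asymm htx]
      · simp [htx, h]
  | cons s S ih =>
      by_cases hxs : (decide (k1 x < k1 s) || (!decide (k1 s < k1 x) && decide (k2 x < k2 s))) = true
      · -- x goes before s
        have hx1s : k1 x ≤ k1 s := by
          rcases Bool.or_eq_true_iff.mp hxs with h' | h'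
          · exact (of_decide_eq_true h').le
          · exact le_of_not_gt (by simpa using (Bool.and_eq_true_iff.mp h').1)
        rw [pv_insertBy_cons _ x s S, if_pos hxs]
        by_cases hts : k1 t < k1 s
        · rw [pv_insertBy_cons (fun a b => decide (k1 a < k1 b)) t s S, if_pos (by simpa using hts)]
          by_cases htx : k1 t < k1 x
          · rw [pv_insertBy_cons _ t x (s :: S), if_pos (by simpa using htx)]
            rw [pv_insertBy_cons _ x t (s :: S), if_neg (by simp [htx, asymm htx]),
              pv_insertBy_cons _ x s S, if_pos hxs]
          · rw [pv_insertBy_cons _ t x (s :: S), if_neg (by simpa using htx)]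
            rw [pv_insertBy_cons _ x t (s :: S), if_pos (by simp [htx, h])]
            rw [pv_insertBy_cons (fun a b => decide (k1 a < k1 b)) t s S, if_pos (by simpa using hts)]
        · rw [pv_insertBy_cons (fun a b => decide (k1 a < k1 b)) t s S, if_neg (by simpa using hts)]
          have htx : ¬ k1 t < k1 x := not_lt.mpr (hx1s.trans (not_lt.mp hts))
          rw [pv_insertBy_cons _ t x (s :: S), if_neg (by simpa using htx)]
          rw [pv_insertBy_cons _ x s (PySem.List.insertBy (fun a b => decide (k1 a < k1 b)) t S),
            if_pos hxs]
          rw [pv_insertBy_cons (fun a b => decide (k1 a < k1 b)) t s S, if_neg (by simpa using hts)]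
      · -- x goes after s
        have hs1x : ¬ k1 x < k1 s := by
          intro h'; exact hxs (by simp [h'])
        rw [pv_insertBy_cons _ x s S, if_neg hxs]
        by_cases hts : k1 t < k1 s
        · rw [pv_insertBy_cons (fun a b => decide (k1 a < k1 b)) t s S, if_pos (by simpa using hts)]
          have htx : k1 t < k1 x := lt_of_lt_of_le hts (not_lt.mp hs1x)
          rw [pv_insertBy_cons (fun a b => decide (k1 a < k1 b)) t s
            (PySem.List.insertBy _ x S), if_pos (by simpa using hts)]
          rw [pv_insertBy_cons _ x t (s :: S), if_neg (by simp [asymm htx, htx])]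
          rw [pv_insertBy_cons _ x s S, if_neg hxs]
        · rw [pv_insertBy_cons (fun a b => decide (k1 a < k1 b)) t s S, if_neg (by simpa using hts)]
          rw [pv_insertBy_cons (fun a b => decide (k1 a < k1 b)) t s
            (PySem.List.insertBy _ x S), if_neg (by simpa using hts)]
          rw [pv_insertBy_cons _ x s (PySem.List.insertBy (fun a b => decide (k1 a < k1 b)) t S),
            if_neg hxs]
          rw [ih]

lemma pv_sort_insert {α κ₁ κ₂ : Type} [LinearOrder κ₁] [LinearOrder κ₂]
    (k1 : α → κ₁) (k2 : α → κ₂) (T : List α)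
    (hT : T.Pairwise (fun a b => k2 a ≤ k2 b)) (x : α) :
    PySem.List.sorted (PySem.List.insertBy (fun a b => decide (k2 a < k2 b)) x T) k1
      = PySem.List.insertBy
          (fun a b => decide (k1 a < k1 b) || (!decide (k1 b < k1 a) && decide (k2 a < k2 b))) x
          (PySem.List.sorted T k1) := by
  induction T using List.reverseRecOn with
  | nil => rfl
  | append_singleton T' t ih =>
      obtain ⟨hT', _, hall⟩ := List.pairwise_append.mp hT
      have hall' : ∀ y ∈ T', k2 y ≤ k2 t := fun y hy => hall y hy t (List.mem_singleton_self t)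
      by_cases hex : ∃ y ∈ T', decide (k2 x < k2 y) = true
      · obtain ⟨y, hyT, hxy⟩ := hex
        have hxt : k2 x < k2 t := lt_of_lt_of_le (of_decide_eq_true hxy) (hall' y hyT)
        rw [pv_insertBy_append_left _ _ _ _ ⟨y, hyT, hxy⟩, pv_sorted_append, ih hT',
          pv_insert_comm k1 k2 x t hxt, pv_sorted_append]
      · push Not at hex
        have hnall : ∀ y ∈ T', decide (k2 x < k2 y) = false := by
          intro y hy
          exact Bool.not_eq_true _ ▸ (by simpa using hex y hy)
        rw [pv_insertBy_append_right _ _ _ _ hnall]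
        by_cases hxt : k2 x < k2 t
        · have : PySem.List.insertBy (fun a b => decide (k2 a < k2 b)) x [t] = [x, t] := by
            simp [pv_insertBy_cons, hxt]
          rw [this]
          have hsplit : T' ++ [x, t] = (T' ++ [x]) ++ [t] := by simp
          rw [hsplit, pv_sorted_append, pv_sorted_append]
          have hcongr : PySem.List.insertBy (fun a b => decide (k1 a < k1 b)) x
              (PySem.List.sorted T' k1)
              = PySem.List.insertBy
                (fun a b => decide (k1 a < k1 b) || (!decide (k1 b < k1 a) && decide (k2 a < k2 b))) x
                (PySem.List.sorted T' k1) := by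
            apply pv_insertBy_congr
            intro y hy
            have hyT : y ∈ T' := (PySem.List.mem_sorted T' k1 false y).mp hy
            simp [hnall y hyT]
          rw [hcongr, pv_insert_comm k1 k2 x t hxt, pv_sorted_append]
        · have : PySem.List.insertBy (fun a b => decide (k2 a < k2 b)) x [t] = [t, x] := by
            simp [pv_insertBy_cons, pv_insertBy_nil, hxt]
          rw [this]
          have hsplit : T' ++ [t, x] = (T' ++ [t]) ++ [x] := by simp
          rw [hsplit, pv_sorted_append]
          apply pv_insertBy_congr
          intro y hy
          have hyT : y ∈ T' ++ [t] := (PySem.List.mem_sorted _ k1 false y).mp hy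
          rcases List.mem_append.mp hyT with hy' | hy'
          · simp [hnall y hy']
          · have : y = t := List.mem_singleton.mp hy'
            subst this
            simp [hxt]

theorem pv_two_pass {α κ₁ κ₂ : Type} [LinearOrder κ₁] [LinearOrder κ₂]
    (k1 : α → κ₁) (k2 : α → κ₂) (xs : List α) :
    PySem.List.sorted (PySem.List.sorted xs k2) k1 = PySem.List.sorted2 xs k1 k2 := by
  induction xs using List.reverseRecOn with
  | nil => rfl
  | append_singleton ys x ih =>
      rw [pv_sorted_append, pv_sorted2_append, ← ih,
        pv_sort_insert k1 k2 _ (PySem.List.sorted_pairwise ys k2) x]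

-- sorted2 commutes with map when the keys factor through the mapped function
lemma pv_insertBy_map {α β : Type} (f : α → β) (p : α → α → Bool) (q : β → β → Bool)
    (h : ∀ a b, q (f a) (f b) = p a b) (x : α) (ys : List α) :
    PySem.List.insertBy q (f x) (ys.map f) = (PySem.List.insertBy p x ys).map f := by
  induction ys with
  | nil => simp [PySem.List.insertBy]
  | cons y t ih =>
      simp only [List.map, PySem.List.insertBy, h]
      by_cases hp : p x y = true <;> simp [hp, ih]

lemma pv_sorted2_map {α β κ₁ κ₂ : Type} [LinearOrder κ₁] [LinearOrder κ₂]
    (f : α → β) (K1 : β → κ₁) (K2 : β → κ₂) (xs : List α) :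
    PySem.List.sorted2 (xs.map f) K1 K2 false
      = (PySem.List.sorted2 xs (fun a => K1 (f a)) (fun a => K2 (f a)) false).map f := by
  simp only [PySem.List.sorted2]
  have h : ∀ (acc : List α),
      List.foldl (fun acc x => PySem.List.insertBy
          (fun a b => decide (K1 a < K1 b) || (!decide (K1 b < K1 a) && decide (K2 a < K2 b))) x acc)
        (acc.map f) (xs.map f)
      = (List.foldl (fun acc x => PySem.List.insertBy
          (fun a b => decide (K1 (f a) < K1 (f b)) || (!decide (K1 (f b) < K1 (f a)) && decide (K2 (f a) < K2 (f b)))) x acc)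
        acc xs).map f := by
    induction xs with
    | nil => intro acc; rfl
    | cons x t ih =>
        intro acc
        simp only [List.map, List.foldl]
        rw [pv_insertBy_map f _ _ (fun a b => rfl) x acc, ih]
  simpa using h []

-- ===== VERDICT (by name: the statement is the Claim_ definition above) =====
theorem sortRoman_spec : Claim_equal_sortRoman := by
  intro names _hDom _hPre
  unfold Spec_sortRoman sortRoman sortRoman_alt
  rw [PySem.List.foldl_append_singleton_eq_map
    (fun nm => (pvRomanToDecimal ((PySem.List.pyGet? (PySem.Str.split₀ nm) 1).getD ""), nm)) names []]
  simp only [List.nil_append]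
  rw [pv_sorted2_map
    (fun nm => (pvRomanToDecimal ((PySem.List.pyGet? (PySem.Str.split₀ nm) 1).getD ""), nm))
    (fun x => (PySem.List.pyGet? (PySem.Str.split₀ x.2) 0).getD "") (fun x => x.1) names]
  simp only [List.map_map]
  rw [← pv_two_pass]
  have hkey : (fun nm => pvbRoman ((PySem.List.pyGet? (PySem.Str.split₀ nm) 1).getD ""))
       = (fun nm => pvRomanToDecimal ((PySem.List.pyGet? (PySem.Str.split₀ nm) 1).getD "")) := by
    funext nm; exact pv_roman_eq _
  rw [hkey]
  simp [Function.comp_def]
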